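-- pv_equiv track=rewrite | github.com/linhdvu14/cp-sols | sols/CodeForces/1823_d2/C_Strongly_Composite.py | solve
-- ===== SOURCE A (Python) =====
-- from collections import defaultdict
--
-- def solve(N, A):
--     cnt = defaultdict(int)
--     for a in A:
--         d = 2
--         while d * d <= a:
--             while a % d == 0:
--                 cnt[d] += 1
--                 a //= d
--             d += 1
--         if a > 1: cnt[a] += 1
--
--     res = rem = 0
--     for c in cnt.values():
--         res += c // 2
--         rem += c % 2
--     res += rem // 3
--
--     return res
-- ===== SOURCE B (Python) =====
-- def solve(N, A):
--     # Sieve of Eratosthenes once up to isqrt(max(A)); factor every element by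
--     # dividing by sieve primes only, aggregate exponents in one counter dict.
--     mx = 0
--     for a in A:
--         if a > mx:
--             mx = a
--     lim = 1
--     while (lim + 1) * (lim + 1) <= mx:
--         lim += 1
--     comp = set()
--     primes = []
--     for i in range(2, lim + 1):
--         if i not in comp:
--             primes.append(i)
--             for j in range(i * i, lim + 1, i):
--                 comp.add(j)
--     cnt = {}
--     for a in A:
--         for p in primes:
--             if p * p > a:
--                 break
--             while a % p == 0:
--                 cnt[p] = cnt.get(p, 0) + 1
--                 a //= p
--         if a > 1:
--             cnt[a] = cnt.get(a, 0) + 1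
--     pairs = sum(c // 2 for c in cnt.values())
--     odd = sum(c % 2 for c in cnt.values())
--     return pairs + odd // 3
-- ===== Notes on version B (the rewrite author's own statement) =====
-- stated objective: faster
-- what changed: B replaces A's per-element scan over every candidate divisor d=2,3,4,... by a sieve of Eratosthenes computed once up to isqrt(max(A)): each element is factored by dividing by sieve primes only (plus the single leftover prime), exponents aggregated in one counter dict, then the same pairs+triples formula.
import Mathlib
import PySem

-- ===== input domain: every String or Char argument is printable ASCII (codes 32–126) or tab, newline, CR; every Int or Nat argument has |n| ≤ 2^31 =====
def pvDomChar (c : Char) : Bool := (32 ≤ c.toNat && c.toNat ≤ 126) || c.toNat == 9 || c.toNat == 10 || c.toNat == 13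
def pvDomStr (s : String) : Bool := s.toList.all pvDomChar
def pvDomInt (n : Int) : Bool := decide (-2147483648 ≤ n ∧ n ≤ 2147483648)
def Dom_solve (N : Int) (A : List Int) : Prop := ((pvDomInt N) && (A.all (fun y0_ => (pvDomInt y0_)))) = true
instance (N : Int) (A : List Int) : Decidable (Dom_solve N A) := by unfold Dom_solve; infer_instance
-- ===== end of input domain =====

-- termination measure of the division loops (cited by the ports' decreasing_by)
theorem pvDivShrink (a d : Int) (h : PySem.Int.mod a d = 0 ∧ 0 < a ∧ 2 ≤ d) :
    (PySem.Int.floordiv a d).toNat < a.toNat := by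
  obtain ⟨h1, h2, h3⟩ := h
  have hdvd : d ∣ a := (PySem.Int.mod_eq_zero_iff_dvd a d).mp h1
  have hda : d ≤ a := Int.le_of_dvd h2 hdvd
  have he : PySem.Int.floordiv a d = a / d := PySem.Int.floordiv_eq_ediv_of_pos (by omega)
  have hm : a / d * d = a := Int.ediv_mul_cancel hdvd
  have hq : 1 ≤ a / d := (Int.le_ediv_iff_mul_le (by omega : (0:Int) < d)).mpr (by omega)
  have h4 : a / d < a := by nlinarith
  omega

-- ===== PORT A =====
-- B replaces A's per-element scan over every divisor candidate by a sieve of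
-- Eratosthenes built once up to isqrt(max(A)) and factorization by sieve primes only.

-- inner 'while a % d == 0' of A; the extra '0 < a ∧ 2 ≤ d' conjuncts only make the
-- recursion total (Python reaches this loop only with 4 ≤ a, 2 ≤ d).
def innerA (a d : Int) (cnt : PySem.Dict Int Int) : Int × PySem.Dict Int Int :=
  if h : PySem.Int.mod a d = 0 ∧ 0 < a ∧ 2 ≤ d then
    innerA (PySem.Int.floordiv a d) d (cnt.modify d 0 (· + 1))
  else (a, cnt)
  termination_by a.toNat
  decreasing_by exact pvDivShrink a d h

-- innerA never increases a and keeps it positive (needed to terminate the outer loop)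
theorem innerA_fst_bounds (a d : Int) (cnt : PySem.Dict Int Int) :
    0 < a → 0 < (innerA a d cnt).1 ∧ (innerA a d cnt).1 ≤ a := by
  fun_induction innerA a d cnt with
  | case1 a cnt h ih =>
    intro _
    have hdvd : d ∣ a := (PySem.Int.mod_eq_zero_iff_dvd a d).mp h.1
    have hda : d ≤ a := Int.le_of_dvd h.2.1 hdvd
    have hd : (2:Int) ≤ d := h.2.2
    have he : PySem.Int.floordiv a d = a / d := PySem.Int.floordiv_eq_ediv_of_pos (by omega)
    have hm : a / d * d = a := Int.ediv_mul_cancel hdvd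
    have h2 : 1 ≤ a / d := (Int.le_ediv_iff_mul_le (by omega : (0:Int) < d)).mpr (by omega)
    have h1 : a / d ≤ a := by nlinarith
    rw [he] at ih
    have := ih (by omega)
    rw [he]
    exact ⟨this.1, le_trans this.2 h1⟩
  | case2 => exact fun ha => ⟨ha, le_refl _⟩

-- termination measure of A's outer loop (cited by outerA's decreasing_by)
theorem pvOuterShrink (a d : Int) (cnt : PySem.Dict Int Int) (h : d * d ≤ a ∧ 2 ≤ d) :
    ((innerA a d cnt).1 - (d + 1)).toNat < (a - d).toNat := by
  have hd : (2:Int) ≤ d := h.2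
  have ha : d * d ≤ a := h.1
  have ha0 : 0 < a := by nlinarith
  have hb := innerA_fst_bounds a d cnt ha0
  have hlt : d < a := by nlinarith
  omega

-- outer 'while d * d <= a' of A ('2 ≤ d' again only for totality)
def outerA (a d : Int) (cnt : PySem.Dict Int Int) : Int × PySem.Dict Int Int :=
  if h : d * d ≤ a ∧ 2 ≤ d then
    outerA (innerA a d cnt).1 (d + 1) (innerA a d cnt).2
  else (a, cnt)
  termination_by (a - d).toNat
  decreasing_by exact pvOuterShrink a d cnt h

def solve (N : Int) (A : List Int) : Int :=
  let cnt := A.foldl (fun cnt a =>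
      let r := outerA a 2 cnt
      if 1 < r.1 then r.2.modify r.1 0 (· + 1) else r.2) PySem.Dict.empty
  let rr := cnt.values.foldl
      (fun s c => (s.1 + PySem.Int.floordiv c 2, s.2 + PySem.Int.mod c 2)) ((0:Int), (0:Int))
  rr.1 + PySem.Int.floordiv rr.2 3

-- ===== PORT B =====
-- termination measure of limLoop (cited by its decreasing_by)
theorem pvLimShrink (lim mx : Int) (h : (lim + 1) * (lim + 1) ≤ mx ∧ 1 ≤ lim) :
    (mx - (lim + 1)).toNat < (mx - lim).toNat := by
  have h2 : lim + 1 ≤ (lim + 1) * (lim + 1) := by nlinarith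
  omega

-- 'lim = 1; while (lim+1)**2 <= mx: lim += 1'  ('1 ≤ lim' only for totality)
def limLoop (lim mx : Int) : Int :=
  if h : (lim + 1) * (lim + 1) ≤ mx ∧ 1 ≤ lim then limLoop (lim + 1) mx else lim
  termination_by (mx - lim).toNat
  decreasing_by exact pvLimShrink lim mx h

-- one step of the sieve loop: 'if i not in comp: primes.append(i); for j in range(i*i, lim+1, i): comp.add(j)'
def sieveStep (lim : Int) (st : PySem.Set Int × List Int) (i : Int) : PySem.Set Int × List Int :=
  if i ∉ st.1 then
    ((PySem.List.pyRange (i * i) (lim + 1) i).foldl PySem.Set.add st.1, st.2 ++ [i])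
  else st

-- 'comp = set(); primes = []; for i in range(2, lim+1): …'
def sieveB (lim : Int) : PySem.Set Int × List Int :=
  (PySem.List.pyRange 2 (lim + 1) 1).foldl (sieveStep lim) (PySem.Set.empty, [])

-- 'while a % p == 0: cnt[p] = cnt.get(p, 0) + 1; a //= p'  (extra conjuncts only for totality)
def innerB (a p : Int) (cnt : PySem.Dict Int Int) : Int × PySem.Dict Int Int :=
  if h : PySem.Int.mod a p = 0 ∧ 0 < a ∧ 2 ≤ p then
    innerB (PySem.Int.floordiv a p) p (cnt.insert p (cnt.getD p 0 + 1))
  else (a, cnt)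
  termination_by a.toNat
  decreasing_by exact pvDivShrink a p h

-- 'for p in primes: if p * p > a: break; …'
def primeLoop (ps : List Int) (a : Int) (cnt : PySem.Dict Int Int) : Int × PySem.Dict Int Int :=
  match ps with
  | [] => (a, cnt)
  | p :: rest =>
    if a < p * p then (a, cnt)
    else primeLoop rest (innerB a p cnt).1 (innerB a p cnt).2

def solve_alt (N : Int) (A : List Int) : Int :=
  let mx := A.foldl (fun mx a => if mx < a then a else mx) 0
  let lim := limLoop 1 mx
  let primes := (sieveB lim).2
  let cnt := A.foldl (fun cnt a =>
      let r := primeLoop primes a cnt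
      if 1 < r.1 then r.2.insert r.1 (r.2.getD r.1 0 + 1) else r.2) PySem.Dict.empty
  (cnt.values.map (fun c => PySem.Int.floordiv c 2)).sum
    + PySem.Int.floordiv ((cnt.values.map (fun c => PySem.Int.mod c 2)).sum) 3

-- ===== PRECONDITION & SPEC =====
def Spec_solve (N : Int) (A : List Int) (out : Int) : Prop := out = solve_alt N A
instance (N : Int) (A : List Int) (out : Int) : Decidable (Spec_solve N A out) := by unfold Spec_solve; infer_instance

-- ===== CLAIM (what is proved, stated in full; the proofs are below) =====
def Claim_equal_solve : Prop := ∀ (N : Int) (A : List Int), Dom_solve N A → Spec_solve N A (solve N A)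

-- ===== LEMMAS AND PROOFS =====

-- canonical prime-factor list of an integer (empty for a ≤ 1)
def facts (a : Int) : List Int :=
  if 1 < a then List.map (fun n : Nat => (n : Int)) a.toNat.primeFactorsList else []

-- pure mirror of innerA/innerB: (leftover, emitted factors)
def eInner (a d : Int) : Int × List Int :=
  if h : PySem.Int.mod a d = 0 ∧ 0 < a ∧ 2 ≤ d then
    ((eInner (PySem.Int.floordiv a d) d).1, d :: (eInner (PySem.Int.floordiv a d) d).2)
  else (a, [])
  termination_by a.toNat
  decreasing_by exact pvDivShrink a d h

theorem innerA_eq (a d : Int) (cnt : PySem.Dict Int Int) :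
    innerA a d cnt
      = ((eInner a d).1, (eInner a d).2.foldl (fun d x => d.modify x 0 (· + 1)) cnt) := by
  fun_induction innerA a d cnt with
  | case1 a cnt h ih =>
    rw [eInner, dif_pos h]
    simpa using ih
  | case2 a cnt h =>
    rw [eInner, dif_neg h]
    rfl

theorem innerB_eq (a p : Int) (cnt : PySem.Dict Int Int) :
    innerB a p cnt
      = ((eInner a p).1, (eInner a p).2.foldl (fun d x => d.insert x (d.getD x 0 + 1)) cnt) := by
  fun_induction innerB a p cnt with
  | case1 a cnt h ih =>
    rw [eInner, dif_pos h]
    simpa using ih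
  | case2 a cnt h =>
    rw [eInner, dif_neg h]
    rfl

theorem eInner_fst_bounds (a d : Int) :
    0 < a → 0 < (eInner a d).1 ∧ (eInner a d).1 ≤ a := by
  intro ha
  have := innerA_fst_bounds a d PySem.Dict.empty ha
  rw [innerA_eq] at this
  simpa using this

-- termination measure of eOuter (cited by its decreasing_by)
theorem pvEOuterShrink (a d : Int) (h : d * d ≤ a ∧ 2 ≤ d) :
    ((eInner a d).1 - (d + 1)).toNat < (a - d).toNat := by
  have hd : (2:Int) ≤ d := h.2
  have ha : d * d ≤ a := h.1
  have ha0 : 0 < a := by nlinarith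
  have hb := eInner_fst_bounds a d ha0
  have hlt : d < a := by nlinarith
  omega

-- pure mirror of outerA
def eOuter (a d : Int) : Int × List Int :=
  if h : d * d ≤ a ∧ 2 ≤ d then
    ((eOuter (eInner a d).1 (d + 1)).1, (eInner a d).2 ++ (eOuter (eInner a d).1 (d + 1)).2)
  else (a, [])
  termination_by (a - d).toNat
  decreasing_by exact pvEOuterShrink a d h

theorem outerA_eq (a d : Int) (cnt : PySem.Dict Int Int) :
    outerA a d cnt
      = ((eOuter a d).1, (eOuter a d).2.foldl (fun d x => d.modify x 0 (· + 1)) cnt) := by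
  fun_induction outerA a d cnt with
  | case1 a d cnt h ih =>
    rw [eOuter, dif_pos h]
    rw [innerA_eq] at ih
    simpa [innerA_eq, List.foldl_append] using ih
  | case2 a d cnt h =>
    rw [eOuter, dif_neg h]
    rfl

-- the factor list A emits for one element
def emitA (a : Int) : List Int :=
  if 1 < (eOuter a 2).1 then (eOuter a 2).2 ++ [(eOuter a 2).1] else (eOuter a 2).2

theorem eInner_spec (a d : Int) :
    0 < a → 2 ≤ d →
    0 < (eInner a d).1 ∧ ¬ d ∣ (eInner a d).1 ∧
      (eInner a d).2.prod * (eInner a d).1 = a ∧ ∀ x ∈ (eInner a d).2, x = d := by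
  fun_induction eInner a d with
  | case1 a h ih =>
    intro ha hd
    have hdvd : d ∣ a := (PySem.Int.mod_eq_zero_iff_dvd a d).mp h.1
    have hda : d ≤ a := Int.le_of_dvd ha hdvd
    have he : PySem.Int.floordiv a d = a / d := PySem.Int.floordiv_eq_ediv_of_pos (by omega)
    have hm : a / d * d = a := Int.ediv_mul_cancel hdvd
    have h2 : 1 ≤ a / d := (Int.le_ediv_iff_mul_le (by omega : (0:Int) < d)).mpr (by omega)
    obtain ⟨p1, p2, p3, p4⟩ := ih (by rw [he]; omega) hd
    refine ⟨p1, p2, ?_, ?_⟩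
    · rw [he] at p3
      simp only [List.prod_cons, mul_assoc]
      rw [he, p3, mul_comm]
      exact hm
    · intro x hx
      rcases List.mem_cons.mp hx with h' | h'
      · exact h'
      · exact p4 x h'
  | case2 a h =>
    intro ha hd
    refine ⟨ha, ?_, by simp, by simp⟩
    intro hdvd
    exact h ⟨(PySem.Int.mod_eq_zero_iff_dvd a d).mpr hdvd, ha, hd⟩

theorem int_prime_of_no_small (n : Int) (h1 : 1 < n)
    (h2 : ∀ k : Int, 2 ≤ k → k * k ≤ n → ¬ k ∣ n) : n.toNat.Prime := by
  rw [Nat.prime_def_le_sqrt]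
  refine ⟨by omega, ?_⟩
  intro m hm hsq hdvd
  have hmm : m * m ≤ n.toNat := Nat.le_sqrt.mp hsq
  refine h2 (m : Int) (by exact_mod_cast hm) ?_ ?_
  · have h3 : ((m * m : Nat) : Int) ≤ (n.toNat : Int) := by exact_mod_cast hmm
    rw [Int.toNat_of_nonneg (by omega)] at h3
    push_cast at h3
    exact h3
  · have : (m : Int) ∣ (n.toNat : Int) := Int.natCast_dvd_natCast.mpr hdvd
    rwa [Int.toNat_of_nonneg (by omega)] at this

theorem eOuter_spec (a d : Int) :
    0 < a → 2 ≤ d → (∀ k : Int, 2 ≤ k → k < d → ¬ k ∣ a) →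
    0 < (eOuter a d).1 ∧ (eOuter a d).2.prod * (eOuter a d).1 = a ∧
      (∀ p ∈ (eOuter a d).2, 0 < p ∧ p.toNat.Prime) ∧
      (∃ D, d ≤ D ∧ (eOuter a d).1 < D * D ∧
        ∀ k : Int, 2 ≤ k → k < D → ¬ k ∣ (eOuter a d).1) := by
  fun_induction eOuter a d with
  | case1 a d h ih =>
    intro ha hd hinv
    obtain ⟨q1, q2, q3, q4⟩ := eInner_spec a d ha hd
    have hsub : (eInner a d).1 ∣ a := ⟨(eInner a d).2.prod, by rw [mul_comm]; exact q3.symm⟩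
    have hinv' : ∀ k : Int, 2 ≤ k → k < d + 1 → ¬ k ∣ (eInner a d).1 := by
      intro k hk hkd hkdvd
      by_cases hkd2 : k < d
      · exact hinv k hk hkd2 (hkdvd.trans hsub)
      · have hkeq : k = d := by omega
        subst hkeq
        exact q2 hkdvd
    obtain ⟨s1, s2, s3, D, hD1, hD2, hD3⟩ := ih q1 (by omega) hinv'
    refine ⟨s1, ?_, ?_, ⟨D, by omega, hD2, hD3⟩⟩
    · simp only [List.prod_append, mul_assoc]
      rw [s2]
      exact q3
    · intro p hp
      rcases List.mem_append.mp hp with hp1 | hp2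
      · have hpd := q4 p hp1
        subst hpd
        have hdl : p ∣ a := (List.dvd_prod hp1).trans ⟨(eInner a p).1, q3.symm⟩
        refine ⟨by omega, ?_⟩
        rw [Nat.prime_def_lt]
        refine ⟨by omega, ?_⟩
        intro m hmlt hmdvd
        by_contra hm1
        have hm0 : m ≠ 0 := by
          rintro rfl
          rw [Nat.zero_dvd] at hmdvd
          omega
        have hm2 : 2 ≤ m := by omega
        have hmd : (m : Int) ∣ p := by
          have := Int.natCast_dvd_natCast.mpr hmdvd
          rwa [Int.toNat_of_nonneg (by omega)] at this
        have hmlt' : (m : Int) < p := by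
          have h1 : (m : Int) < (p.toNat : Int) := by exact_mod_cast hmlt
          rwa [Int.toNat_of_nonneg (by omega)] at h1
        exact hinv m (by exact_mod_cast hm2) hmlt' (hmd.trans hdl)
      · exact s3 p hp2
  | case2 a d h =>
    intro ha hd hinv
    have hlt : a < d * d := by
      by_contra hcon
      exact h ⟨by omega, hd⟩
    exact ⟨ha, by simp, by simp, ⟨d, le_rfl, hlt, hinv⟩⟩

theorem prodToNat (l : List Int) (h : ∀ p ∈ l, 0 ≤ p) :
    ((l.map Int.toNat).prod : Int) = l.prod := by
  induction l with
  | nil => simp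
  | cons p t ih =>
    simp only [List.map_cons, List.prod_cons, Nat.cast_mul]
    rw [Int.toNat_of_nonneg (h p List.mem_cons_self),
      ih (fun q hq => h q (List.mem_cons_of_mem _ hq))]

-- a list of (positive) primes multiplying to a is a permutation of facts a
theorem perm_facts (l : List Int) (a : Int) (ha : 0 < a) (hp : l.prod = a)
    (hprime : ∀ p ∈ l, 0 < p ∧ p.toNat.Prime) : l.Perm (facts a) := by
  have hfacts : facts a = List.map (fun n : Nat => (n : Int)) a.toNat.primeFactorsList := by
    unfold facts
    split
    · rfl
    · have ha1 : a = 1 := by omega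
      subst ha1
      simp
  have hnn : ∀ p ∈ l, 0 ≤ p := fun p hq => le_of_lt (hprime p hq).1
  have hprodnat : (l.map Int.toNat).prod = a.toNat := by
    have h1 := prodToNat l hnn
    rw [hp] at h1
    omega
  have hperm := Nat.primeFactorsList_unique hprodnat (by
    intro p hp'
    obtain ⟨q, hq, rfl⟩ := List.mem_map.mp hp'
    exact (hprime q hq).2)
  have hid : l = (l.map Int.toNat).map (fun n => ((n : Nat) : Int)) := by
    rw [List.map_map]
    symm
    exact (List.map_congr_left (fun x hx => Int.toNat_of_nonneg (hnn x hx))).trans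
      (List.map_id l)
  have h2 := hperm.map (fun n : Nat => (n : Int))
  rw [← hid] at h2
  rwa [hfacts]

theorem emitA_perm (a : Int) : (emitA a).Perm (facts a) := by
  by_cases ha : 0 < a
  · obtain ⟨o1, o2, o3, D, hD1, hD2, hD3⟩ :=
      eOuter_spec a 2 ha le_rfl (by intro k hk hk2 _; omega)
    unfold emitA
    split
    · next h1 =>
      apply perm_facts _ _ ha
      · rw [List.prod_append, List.prod_singleton]
        exact o2
      · intro p hp
        rcases List.mem_append.mp hp with hp1 | hp2
        · exact o3 p hp1
        · have hpe : p = (eOuter a 2).1 := by simpa using hp2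
          subst hpe
          refine ⟨by omega, int_prime_of_no_small _ h1 ?_⟩
          intro k hk hkk
          apply hD3 k hk
          nlinarith
    · next h1 =>
      have he1 : (eOuter a 2).1 = 1 := by omega
      apply perm_facts _ _ ha
      · rw [he1, mul_one] at o2
        exact o2
      · exact o3
  · have hout : eOuter a 2 = (a, []) := by
      rw [eOuter, dif_neg]
      intro hcon
      omega
    unfold emitA
    rw [hout]
    simp only []
    have : ¬ (1:Int) < a := by omega
    rw [if_neg this]
    unfold facts
    rw [if_neg (by omega)]

-- ===== B-side: sieve correctness =====

-- any divisor k ≥ 2 of a yields a prime divisor q ≤ k of a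
theorem exists_small_prime_divisor (k a : Int) (hk : 2 ≤ k) (hka : k ∣ a) :
    ∃ q : Int, 2 ≤ q ∧ q ≤ k ∧ q.toNat.Prime ∧ q ∣ a := by
  refine ⟨(k.toNat.minFac : Int), ?_, ?_, ?_, ?_⟩
  · have := (Nat.minFac_prime (by omega : k.toNat ≠ 1)).two_le
    omega
  · have h1 : k.toNat.minFac ≤ k.toNat := Nat.minFac_le (by omega)
    omega
  · simpa using Nat.minFac_prime (by omega : k.toNat ≠ 1)
  · have h1 : (k.toNat.minFac : Int) ∣ (k.toNat : Int) :=
      Int.natCast_dvd_natCast.mpr (Nat.minFac_dvd _)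
    rw [Int.toNat_of_nonneg (by omega)] at h1
    exact h1.trans hka

theorem int_prime_dvd_prime_eq (q p : Int) (hq2 : 2 ≤ q) (hp2 : 2 ≤ p)
    (hqp : q.toNat.Prime) (hpp : p.toNat.Prime) (hd : q ∣ p) : q = p := by
  have h1 : (q.toNat : Int) ∣ (p.toNat : Int) := by
    rw [Int.toNat_of_nonneg (by omega), Int.toNat_of_nonneg (by omega)]
    exact hd
  have h2 := (Nat.prime_dvd_prime_iff_eq hqp hpp).mp (Int.natCast_dvd_natCast.mp h1)
  omega

-- sieve invariant after the outer loop has processed 2..m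
def SInv (lim m : Int) (st : PySem.Set Int × List Int) : Prop :=
  (∀ x : Int, x ∈ st.1 ↔
      ∃ p : Int, 2 ≤ p ∧ p ≤ m ∧ p.toNat.Prime ∧ p ∣ x ∧ p * p ≤ x ∧ x ≤ lim) ∧
  (∀ p : Int, p ∈ st.2 ↔ 2 ≤ p ∧ p ≤ m ∧ p.toNat.Prime) ∧
  st.2.Pairwise (· < ·)

theorem sieveStep_inv (lim m : Int) (st : PySem.Set Int × List Int)
    (h : SInv lim m st) (hm : 1 ≤ m) (hml : m + 1 ≤ lim) :
    SInv lim (m + 1) (sieveStep lim st (m + 1)) := by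
  obtain ⟨hc, hp, hs⟩ := h
  by_cases hin : (m + 1) ∈ st.1
  · have hnotp : ¬ (m + 1).toNat.Prime := by
      intro hpr
      obtain ⟨q, h1, h2, h3, h4, h5, h6⟩ := (hc (m + 1)).mp hin
      have := int_prime_dvd_prime_eq q (m + 1) h1 (by omega) h3 hpr h4
      nlinarith
    unfold sieveStep
    rw [if_neg (by simpa using hin)]
    refine ⟨?_, ?_, hs⟩
    · intro x
      rw [hc x]
      constructor
      · rintro ⟨q, h1, h2, h3, h4, h5, h6⟩
        exact ⟨q, h1, by omega, h3, h4, h5, h6⟩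
      · rintro ⟨q, h1, h2, h3, h4, h5, h6⟩
        by_cases hqm : q ≤ m
        · exact ⟨q, h1, hqm, h3, h4, h5, h6⟩
        · exfalso
          have hq : q = m + 1 := by omega
          rw [hq] at h3
          exact hnotp h3
    · intro p
      rw [hp p]
      constructor
      · rintro ⟨h1, h2, h3⟩
        exact ⟨h1, by omega, h3⟩
      · rintro ⟨h1, h2, h3⟩
        by_cases hpm : p ≤ m
        · exact ⟨h1, hpm, h3⟩
        · exfalso
          have hq : p = m + 1 := by omega
          rw [hq] at h3
          exact hnotp h3
  · have hipr : (m + 1).toNat.Prime := by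
      apply int_prime_of_no_small (m + 1) (by omega)
      intro k hk hkk hkd
      obtain ⟨q, hq2, hqk, hqpr, hqd⟩ := exists_small_prime_divisor k (m + 1) hk hkd
      have hkm : k ≤ m := by nlinarith
      apply hin
      refine (hc (m + 1)).mpr ⟨q, hq2, by omega, hqpr, hqd, ?_, by omega⟩
      have : q * q ≤ k * k := mul_le_mul hqk hqk (by omega) (by omega)
      omega
    unfold sieveStep
    rw [if_pos (by simpa using hin)]
    have hupd : (PySem.List.pyRange ((m + 1) * (m + 1)) (lim + 1) (m + 1)).foldl
        PySem.Set.add st.1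
        = PySem.Set.update st.1 (PySem.List.pyRange ((m + 1) * (m + 1)) (lim + 1) (m + 1)) := rfl
    refine ⟨?_, ?_, ?_⟩
    · intro x
      simp only
      rw [hupd, PySem.Set.mem_update, hc x,
        PySem.List.mem_pyRange_iff_of_pos (by omega : (0:Int) < m + 1)]
      constructor
      · rintro (⟨q, h1, h2, h3, h4, h5, h6⟩ | ⟨hr1, hr2, hr3⟩)
        · exact ⟨q, h1, by omega, h3, h4, h5, h6⟩
        · have hdx : (m + 1) ∣ x := by
            have := dvd_add hr3 (dvd_mul_left (m + 1) (m + 1))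
            simpa using this
          exact ⟨m + 1, by omega, le_refl _, hipr, hdx, hr1, by omega⟩
      · rintro ⟨q, h1, h2, h3, h4, h5, h6⟩
        by_cases hqm : q ≤ m
        · exact Or.inl ⟨q, h1, hqm, h3, h4, h5, h6⟩
        · have hq : q = m + 1 := by omega
          subst hq
          exact Or.inr ⟨h5, by omega, dvd_sub h4 (dvd_mul_left _ _)⟩
    · intro p
      simp only
      rw [List.mem_append, hp p, List.mem_singleton]
      constructor
      · rintro (⟨h1, h2, h3⟩ | rfl)
        · exact ⟨h1, by omega, h3⟩
        · exact ⟨by omega, le_refl _, hipr⟩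
      · rintro ⟨h1, h2, h3⟩
        by_cases hpm : p ≤ m
        · exact Or.inl ⟨h1, hpm, h3⟩
        · exact Or.inr (by omega)
    · simp only
      rw [List.pairwise_append]
      refine ⟨hs, List.pairwise_singleton _ _, ?_⟩
      intro x hx y hy
      rw [List.mem_singleton] at hy
      have := ((hp x).mp hx).2.1
      omega

theorem sieveB_inv (lim : Int) (hl : 1 ≤ lim) : SInv lim lim (sieveB lim) := by
  suffices h : ∀ m : Int, 1 ≤ m → m ≤ lim →
      SInv lim m ((PySem.List.pyRange 2 (m + 1) 1).foldl (sieveStep lim)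
        (PySem.Set.empty, [])) by
    exact h lim hl le_rfl
  intro m hm
  induction m, hm using Int.le_induction with
  | base =>
    intro _
    rw [PySem.List.pyRange_one_eq_nil (by omega)]
    refine ⟨?_, ?_, List.Pairwise.nil⟩
    · intro x
      constructor
      · intro hx
        exact absurd hx (by simp [PySem.Set.empty])
      · rintro ⟨q, h1, h2, h3, h4, h5, h6⟩
        omega
    · intro p
      constructor
      · intro hp
        exact absurd hp (List.not_mem_nil)
      · rintro ⟨h1, h2, h3⟩
        omega
  | succ n hn ih =>
    intro hle
    rw [PySem.List.pyRange_one_succ_right (by omega : (2:Int) ≤ n + 1), List.foldl_append,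
      List.foldl_cons, List.foldl_nil]
    exact sieveStep_inv lim n _ (ih (by omega)) hn hle

theorem limLoop_spec (mx lim : Int) :
    1 ≤ lim → 1 ≤ limLoop lim mx ∧ mx < (limLoop lim mx + 1) * (limLoop lim mx + 1) := by
  fun_induction limLoop lim mx with
  | case1 lim h ih =>
    intro _
    exact ih (by omega)
  | case2 lim h =>
    intro h1
    refine ⟨h1, ?_⟩
    by_contra hcon
    exact h ⟨by omega, h1⟩

-- ===== B-side: factorization by the prime list =====

-- pure mirror of primeLoop: (leftover, emitted factors)
def ePrime : List Int → Int → Int × List Int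
  | [], a => (a, [])
  | p :: rest, a =>
    if a < p * p then (a, [])
    else ((ePrime rest (eInner a p).1).1, (eInner a p).2 ++ (ePrime rest (eInner a p).1).2)

theorem primeLoop_eq (ps : List Int) : ∀ (a : Int) (cnt : PySem.Dict Int Int),
    primeLoop ps a cnt
      = ((ePrime ps a).1, (ePrime ps a).2.foldl (fun d x => d.insert x (d.getD x 0 + 1)) cnt) := by
  induction ps with
  | nil => intro a cnt; rfl
  | cons p rest ih =>
    intro a cnt
    simp only [primeLoop, ePrime]
    by_cases hb : a < p * p
    · rw [if_pos hb, if_pos hb]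
      rfl
    · rw [if_neg hb, if_neg hb, innerB_eq, ih]
      simp [List.foldl_append]

theorem no_small_div_prime (lim mx a : Int) (hmx : mx < (lim + 1) * (lim + 1))
    (hl : 0 ≤ lim) (hamx : a ≤ mx) (h1 : 1 < a)
    (hnp : ∀ q : Int, 2 ≤ q → q.toNat.Prime → q ∣ a → q * q ≤ a → q ≤ lim → False) :
    a.toNat.Prime := by
  apply int_prime_of_no_small a h1
  intro k hk hkk hkd
  obtain ⟨q, hq2, hqk, hqp, hqa⟩ := exists_small_prime_divisor k a hk hkd
  have hklim : k ≤ lim := by nlinarith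
  have hqq : q * q ≤ k * k := mul_le_mul hqk hqk (by omega) (by omega)
  exact hnp q hq2 hqp hqa (by omega) (by omega)

theorem ePrime_spec (lim mx : Int) (hl : 0 ≤ lim) (hmx : mx < (lim + 1) * (lim + 1)) :
    ∀ (ps : List Int) (a : Int), 0 < a → a ≤ mx →
    (∀ p ∈ ps, 2 ≤ p ∧ p.toNat.Prime) →
    ps.Pairwise (· < ·) →
    (∀ q : Int, 2 ≤ q → q.toNat.Prime → q ∣ a → q ≤ lim → q ∈ ps) →
    0 < (ePrime ps a).1 ∧ (ePrime ps a).2.prod * (ePrime ps a).1 = a ∧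
      (∀ x ∈ (ePrime ps a).2, 0 < x ∧ x.toNat.Prime) ∧
      (1 < (ePrime ps a).1 → (ePrime ps a).1.toNat.Prime) := by
  intro ps
  induction ps with
  | nil =>
    intro a ha hamx _ _ hcompl
    simp only [ePrime]
    refine ⟨ha, by simp, by simp, ?_⟩
    intro h1
    apply no_small_div_prime lim mx a hmx hl hamx h1
    intro q hq2 hqp hqd hqq hql
    exact absurd (hcompl q hq2 hqp hqd hql) (List.not_mem_nil)
  | cons p rest ih =>
    intro a ha hamx hgood hsorted hcompl
    have hp2 : 2 ≤ p := (hgood p List.mem_cons_self).1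
    simp only [ePrime]
    by_cases hb : a < p * p
    · rw [if_pos hb]
      refine ⟨ha, by simp, by simp, ?_⟩
      intro h1
      apply no_small_div_prime lim mx a hmx hl hamx h1
      intro q hq2 hqp hqd hqq hql
      have hqlt : q < p := by nlinarith
      have hqmem := hcompl q hq2 hqp hqd hql
      rcases List.mem_cons.mp hqmem with h' | h'
      · omega
      · have := (List.pairwise_cons.mp hsorted).1 q h'
        omega
    · rw [if_neg hb]
      obtain ⟨q1, q2, q3, q4⟩ := eInner_spec a p ha hp2
      have hsub : (eInner a p).1 ∣ a := ⟨(eInner a p).2.prod, by rw [mul_comm]; exact q3.symm⟩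
      have hle : (eInner a p).1 ≤ a := Int.le_of_dvd ha hsub
      have hcompl' : ∀ q : Int, 2 ≤ q → q.toNat.Prime → q ∣ (eInner a p).1 → q ≤ lim →
          q ∈ rest := by
        intro q hq2 hqp hqd hql
        have hqa : q ∣ a := hqd.trans hsub
        rcases List.mem_cons.mp (hcompl q hq2 hqp hqa hql) with h' | h'
        · subst h'
          exact absurd hqd q2
        · exact h'
      obtain ⟨s1, s2, s3, s4⟩ := ih (eInner a p).1 q1 (by omega)
        (fun x hx => hgood x (List.mem_cons_of_mem _ hx))
        (List.pairwise_cons.mp hsorted).2 hcompl'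
      refine ⟨s1, ?_, ?_, s4⟩
      · simp only [List.prod_append, mul_assoc]
        rw [s2]
        exact q3
      · intro x hx
        rcases List.mem_append.mp hx with h' | h'
        · have := q4 x h'
          subst this
          exact ⟨by omega, (hgood x List.mem_cons_self).2⟩
        · exact s3 x h'

-- the factor list B emits for one element
def emitB (ps : List Int) (a : Int) : List Int :=
  if 1 < (ePrime ps a).1 then (ePrime ps a).2 ++ [(ePrime ps a).1] else (ePrime ps a).2

theorem emitB_perm (lim mx : Int) (hl : 0 ≤ lim) (hmx : mx < (lim + 1) * (lim + 1))
    (ps : List Int) (hgood : ∀ p ∈ ps, 2 ≤ p ∧ p.toNat.Prime)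
    (hsorted : ps.Pairwise (· < ·))
    (hcompl : ∀ q : Int, 2 ≤ q → q.toNat.Prime → q ≤ lim → q ∈ ps)
    (a : Int) (hamx : a ≤ mx) : (emitB ps a).Perm (facts a) := by
  by_cases h1 : 1 < a
  · obtain ⟨e1, e2, e3, e4⟩ := ePrime_spec lim mx hl hmx ps a (by omega) hamx hgood hsorted
      (fun q hq2 hqp _ hql => hcompl q hq2 hqp hql)
    unfold emitB
    split
    · next hgt =>
      apply perm_facts _ _ (by omega)
      · rw [List.prod_append, List.prod_singleton]
        exact e2
      · intro x hx
        rcases List.mem_append.mp hx with h' | h'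
        · exact e3 x h'
        · have : x = (ePrime ps a).1 := by simpa using h'
          subst this
          exact ⟨by omega, e4 hgt⟩
    · next hng =>
      have he1 : (ePrime ps a).1 = 1 := by omega
      apply perm_facts _ _ (by omega)
      · rw [he1, mul_one] at e2
        exact e2
      · exact e3
  · have hE : ePrime ps a = (a, []) := by
      cases ps with
      | nil => rfl
      | cons p rest =>
        have hp2 := (hgood p List.mem_cons_self).1
        simp only [ePrime]
        rw [if_pos (by nlinarith)]
    unfold emitB
    rw [hE]
    simp only
    rw [if_neg h1]
    unfold facts
    rw [if_neg h1]

-- ===== folds and streams =====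

theorem foldl_flatMap {α β σ : Type} (g : α → List β) (f : σ → β → σ) (l : List α) (init : σ) :
    (l.flatMap g).foldl f init = l.foldl (fun acc x => (g x).foldl f acc) init := by
  induction l generalizing init with
  | nil => rfl
  | cons x t ih => simp [List.flatMap_cons, List.foldl_append, ih]

theorem flatMap_count_congr (A : List Int) (f g : Int → List Int)
    (h : ∀ a ∈ A, (f a).Perm (g a)) (x : Int) :
    (A.flatMap f).count x = (A.flatMap g).count x := by
  induction A with
  | nil => rfl
  | cons a t ih =>
    simp only [List.flatMap_cons, List.count_append]
    rw [(h a List.mem_cons_self).count_eq, ih (fun b hb => h b (List.mem_cons_of_mem _ hb))]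

theorem maxfold_eq (A : List Int) :
    A.foldl (fun mx a => if mx < a then a else mx) 0 = A.foldl max 0 := by
  apply PySem.List.foldl_congr_mem
  intro acc x _
  by_cases h : acc < x
  · rw [if_pos h, max_eq_right h.le]
  · rw [if_neg h, max_eq_left (not_lt.mp h)]

theorem solve_assemble (N : Int) (A : List Int) : solve N A = solve_alt N A := by
  simp only [solve, solve_alt]
  set M := A.foldl (fun mx a => if mx < a then a else mx) 0 with hMdef
  have hM0 : 0 ≤ M ∧ ∀ a ∈ A, a ≤ M := by
    rw [hMdef, maxfold_eq]
    exact ⟨(PySem.List.le_foldl_max A 0).1, (PySem.List.le_foldl_max A 0).2⟩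
  have hlim := limLoop_spec M 1 le_rfl
  set L := limLoop 1 M with hLdef
  have hsv := sieveB_inv L hlim.1
  set ps := (sieveB L).2 with hpsdef
  have hgood : ∀ p ∈ ps, 2 ≤ p ∧ p.toNat.Prime := by
    intro p hp
    have := (hsv.2.1 p).mp hp
    exact ⟨this.1, this.2.2⟩
  have hsorted : ps.Pairwise (· < ·) := hsv.2.2
  have hcompl : ∀ q : Int, 2 ≤ q → q.toNat.Prime → q ≤ L → q ∈ ps := by
    intro q h1 h2 h3
    exact (hsv.2.1 q).mpr ⟨h1, h3, h2⟩
  have hpermB : ∀ a ∈ A, (emitB ps a).Perm (facts a) := by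
    intro a ha
    exact emitB_perm L M (by omega) hlim.2 ps hgood hsorted hcompl a (hM0.2 a ha)
  -- counts of both emission streams agree with the canonical stream
  have hcA : ∀ x, (A.flatMap emitA).count x = (A.flatMap facts).count x :=
    flatMap_count_congr A emitA facts (fun a _ => emitA_perm a)
  have hcB : ∀ x, (A.flatMap (emitB ps)).count x = (A.flatMap facts).count x :=
    flatMap_count_congr A (emitB ps) facts hpermB
  have hmemA : ∀ x, x ∈ A.flatMap emitA ↔ x ∈ A.flatMap facts := by
    intro x
    rw [← List.count_pos_iff, ← List.count_pos_iff, hcA]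
  have hmemB : ∀ x, x ∈ A.flatMap (emitB ps) ↔ x ∈ A.flatMap facts := by
    intro x
    rw [← List.count_pos_iff, ← List.count_pos_iff, hcB]
  -- both counter dicts are Dict.counter of their emission streams
  have hstepA : A.foldl (fun cnt a =>
      if 1 < (outerA a 2 cnt).1 then (outerA a 2 cnt).2.modify (outerA a 2 cnt).1 0 (· + 1)
      else (outerA a 2 cnt).2) PySem.Dict.empty
      = PySem.Dict.counter (A.flatMap emitA) := by
    rw [PySem.Dict.counter_eq_foldl, foldl_flatMap]
    apply PySem.List.foldl_congr_mem
    intro cnt a _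
    rw [outerA_eq]
    unfold emitA
    by_cases h : 1 < (eOuter a 2).1
    · rw [if_pos h, if_pos h, List.foldl_append]
      rfl
    · rw [if_neg h, if_neg h]
  have hstepB : A.foldl (fun cnt a =>
      if 1 < (primeLoop ps a cnt).1 then
        (primeLoop ps a cnt).2.insert (primeLoop ps a cnt).1
          ((primeLoop ps a cnt).2.getD (primeLoop ps a cnt).1 0 + 1)
      else (primeLoop ps a cnt).2) PySem.Dict.empty
      = PySem.Dict.counter (A.flatMap (emitB ps)) := by
    rw [← PySem.Dict.foldl_insert_getD_add_one_eq_counter, foldl_flatMap]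
    apply PySem.List.foldl_congr_mem
    intro cnt a _
    rw [primeLoop_eq]
    unfold emitB
    by_cases h : 1 < (ePrime ps a).1
    · rw [if_pos h, if_pos h, List.foldl_append]
      rfl
    · rw [if_neg h, if_neg h]
  -- values of a counter are the counts over the distinct elements
  have hvals : ∀ s : List Int, (PySem.Dict.counter s).values
      = (PySem.Set.ofList s).map (fun k => ((A.flatMap facts).count k : Int)) →
      True := fun _ _ => trivial
  clear hvals
  have hvalsA : (PySem.Dict.counter (A.flatMap emitA)).values
      = (PySem.Set.ofList (A.flatMap emitA)).map
          (fun k => ((A.flatMap facts).count k : Int)) := by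
    rw [PySem.Dict.values_eq_map_keys _ (PySem.Dict.nodup_keys_counter _) 0,
      PySem.Dict.keys_counter]
    apply List.map_congr_left
    intro k _
    rw [PySem.Dict.getD_counter, hcA]
  have hvalsB : (PySem.Dict.counter (A.flatMap (emitB ps))).values
      = (PySem.Set.ofList (A.flatMap (emitB ps))).map
          (fun k => ((A.flatMap facts).count k : Int)) := by
    rw [PySem.Dict.values_eq_map_keys _ (PySem.Dict.nodup_keys_counter _) 0,
      PySem.Dict.keys_counter]
    apply List.map_congr_left
    intro k _
    rw [PySem.Dict.getD_counter, hcB]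
  rw [hstepA, hstepB, hvalsA, hvalsB]
  rw [PySem.List.foldl_prod_mk (f := fun (acc : Int) (c : Int) => acc + PySem.Int.floordiv c 2)
      (g := fun (acc : Int) (c : Int) => acc + PySem.Int.mod c 2) _ 0 0]
  rw [PySem.List.foldl_add, PySem.List.foldl_add]
  simp only [zero_add, List.map_map]
  -- the two distinct-element supports carry the same finite set
  have hT : (PySem.Set.ofList (A.flatMap emitA)).toFinset
      = (PySem.Set.ofList (A.flatMap (emitB ps))).toFinset := by
    ext x
    simp only [List.mem_toFinset, PySem.Set.mem_ofList, hmemA x, hmemB x]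
  have hsum : ∀ F : Int → Int,
      ((PySem.Set.ofList (A.flatMap emitA)).map F).sum
        = ((PySem.Set.ofList (A.flatMap (emitB ps))).map F).sum := by
    intro F
    rw [← List.sum_toFinset F (PySem.Set.nodup_ofList _),
      ← List.sum_toFinset F (PySem.Set.nodup_ofList _), hT]
  rw [hsum, hsum]

-- ===== VERDICT (by name: the statement is the Claim_ definition above) =====
theorem solve_spec : Claim_equal_solve := by
  unfold Claim_equal_solve
  intro N A _
  unfold Spec_solve
  exact solve_assemble N A
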